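-- pv_equiv track=rewrite | github.com/qpwpep/documate-personal | src/eval/reporting.py | _tool_names_to_routes
-- ===== SOURCE A (Python) =====
-- _ROUTE_ORDER: tuple[str, ...] = ("docs", "upload", "local")
--
-- _RETRIEVAL_TOOL_TO_ROUTE: dict[str, str] = {
--     "tavily_search": "docs",
--     "upload_search": "upload",
--     "rag_search": "local",
-- }
--
-- def _route_sort_key(value: str) -> tuple[int, str]:
--     if value in _ROUTE_ORDER:
--         return (_ROUTE_ORDER.index(value), value)
--     return (len(_ROUTE_ORDER), value)
--
-- def _sort_routes(values: set[str] | list[str] | tuple[str, ...]) -> list[str]: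
--     return sorted({str(value) for value in values if str(value)}, key=_route_sort_key)
--
-- def _tool_names_to_routes(tool_names: list[str]) -> list[str]:
--     return _sort_routes(
--         {
--             _RETRIEVAL_TOOL_TO_ROUTE[tool_name]
--             for tool_name in tool_names
--             if tool_name in _RETRIEVAL_TOOL_TO_ROUTE
--         }
--     )
-- ===== SOURCE B (Python) =====
-- _ROUTE_ORDER: tuple[str, ...] = ("docs", "upload", "local")
--
-- _RETRIEVAL_TOOL_TO_ROUTE: dict[str, str] = {
--     "tavily_search": "docs",
--     "upload_search": "upload",
--     "rag_search": "local",
-- }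
--
-- def _tool_names_to_routes(tool_names: list[str]) -> list[str]:
--     present = set()
--     for name in tool_names:
--         route = _RETRIEVAL_TOOL_TO_ROUTE.get(name)
--         if route is not None:
--             present.add(route)
--     return [r for r in _ROUTE_ORDER if r in present]
-- ===== Notes on version B (the rewrite author's own statement) =====
-- stated objective: simpler
-- what changed: B replaces the set-comprehension + comparison sort with rank key by a single .get() pass building the present-route set and a selection pass over the fixed canonical _ROUTE_ORDER tuple, dropping _route_sort_key and _sort_routes entirely.
import Mathlib
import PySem

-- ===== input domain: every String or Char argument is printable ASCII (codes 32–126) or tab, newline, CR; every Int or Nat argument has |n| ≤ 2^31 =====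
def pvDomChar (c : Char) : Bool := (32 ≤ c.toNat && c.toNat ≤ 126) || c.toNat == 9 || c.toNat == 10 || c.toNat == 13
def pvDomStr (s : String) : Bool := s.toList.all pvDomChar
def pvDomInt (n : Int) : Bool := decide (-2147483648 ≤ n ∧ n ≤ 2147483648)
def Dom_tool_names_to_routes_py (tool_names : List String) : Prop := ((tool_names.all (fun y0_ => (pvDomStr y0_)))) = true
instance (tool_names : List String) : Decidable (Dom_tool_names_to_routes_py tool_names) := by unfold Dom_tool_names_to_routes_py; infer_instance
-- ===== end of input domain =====

-- B replaces A's set-comprehension + key-sort pipeline by one .get() pass building the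
-- present-route set and a selection pass over the fixed canonical route order (objective: simpler).


-- ===== PORT A =====
-- module constants (shared by both Pythons)
def pvRouteOrder : List String := ["docs", "upload", "local"]
def pvRetrievalMap : PySem.Dict String String :=
  PySem.Dict.ofList [("tavily_search", "docs"), ("upload_search", "upload"), ("rag_search", "local")]

-- def _route_sort_key(value): if value in _ROUTE_ORDER: return (_ROUTE_ORDER.index(value), value); return (len(_ROUTE_ORDER), value)
def route_sort_key (value : String) : Int × String :=
  if value ∈ pvRouteOrder then
    (((PySem.List.index? pvRouteOrder value).getD 0 : Nat), value)
  else
    (PySem.List.len pvRouteOrder, value)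

-- def _sort_routes(values): return sorted({str(value) for value in values if str(value)}, key=_route_sort_key)
-- str(value) on a str is the string itself, so it is ported as the identity; the tuple key goes through sorted2.
def sort_routes (values : List String) : List String :=
  PySem.List.sorted2
    (values.foldl (fun acc v => if v ≠ "" then PySem.Set.add acc v else acc) PySem.Set.empty)
    (fun v => (route_sort_key v).1) (fun v => (route_sort_key v).2) false

def tool_names_to_routes_py (tool_names : List String) : List String :=
  sort_routes
    (tool_names.foldl
      (fun acc t =>
        if pvRetrievalMap.contains t then PySem.Set.add acc ((pvRetrievalMap.get? t).getD "") else acc)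
      PySem.Set.empty)

-- ===== PORT B =====
def tool_names_to_routes_py_alt (tool_names : List String) : List String :=
  let present : PySem.Set String :=
    tool_names.foldl
      (fun acc name =>
        match pvRetrievalMap.get? name with
        | some route => PySem.Set.add acc route
        | none => acc)
      PySem.Set.empty
  pvRouteOrder.filter (fun r => PySem.Set.contains present r)

-- ===== PRECONDITION & SPEC =====
def Spec_tool_names_to_routes_py (tool_names : List String) (out : List String) : Prop := out = tool_names_to_routes_py_alt tool_names
instance (tool_names : List String) (out : List String) : Decidable (Spec_tool_names_to_routes_py tool_names out) := by unfold Spec_tool_names_to_routes_py; infer_instance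

-- ===== CLAIM (what is proved, stated in full; the proofs are below) =====
def Claim_equal_tool_names_to_routes_py : Prop := ∀ (tool_names : List String), Dom_tool_names_to_routes_py tool_names → Spec_tool_names_to_routes_py tool_names (tool_names_to_routes_py tool_names)

-- ===== LEMMAS AND PROOFS =====

-- the 16 duplicate-free lists over the three route strings: every reachable present-set is one of these
def pvGood (s : List String) : Bool :=
  s ∈ ([[], ["docs"], ["upload"], ["local"],
        ["docs", "upload"], ["upload", "docs"], ["docs", "local"], ["local", "docs"],
        ["upload", "local"], ["local", "upload"],
        ["docs", "upload", "local"], ["docs", "local", "upload"],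
        ["upload", "docs", "local"], ["upload", "local", "docs"],
        ["local", "docs", "upload"], ["local", "upload", "docs"]] : List (List String))

theorem pvMap_get_cases (t : String) :
    pvRetrievalMap.get? t = none ∨ pvRetrievalMap.get? t = some "docs" ∨
    pvRetrievalMap.get? t = some "upload" ∨ pvRetrievalMap.get? t = some "local" := by
  have hi : pvRetrievalMap.items =
      [("tavily_search", "docs"), ("upload_search", "upload"), ("rag_search", "local")] := by decide
  by_cases h1 : t = "tavily_search"
  · subst h1; right; left; decide
  · by_cases h2 : t = "upload_search"
    · subst h2; right; right; left; decide
    · by_cases h3 : t = "rag_search"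
      · subst h3; right; right; right; decide
      · left
        simp [PySem.Dict.get?, hi, Ne.symm h1, Ne.symm h2, Ne.symm h3]

theorem pvMap_contains_eq (t : String) : pvRetrievalMap.contains t = (pvRetrievalMap.get? t).isSome := by
  simp [PySem.Dict.contains, PySem.Dict.get?, List.isSome_find?]

-- A's loop body and B's loop body agree on every tool name
theorem pvStep_eq (acc : PySem.Set String) (t : String) :
    (if pvRetrievalMap.contains t then PySem.Set.add acc ((pvRetrievalMap.get? t).getD "") else acc) =
    (match pvRetrievalMap.get? t with
     | some route => PySem.Set.add acc route
     | none => acc) := by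
  rcases pvMap_get_cases t with h | h | h | h <;>
    simp [pvMap_contains_eq, h]

theorem pvGood_add (s : List String) (hs : pvGood s = true) (v : String)
    (hv : v = "docs" ∨ v = "upload" ∨ v = "local") : pvGood (PySem.Set.add s v) = true := by
  simp only [pvGood, List.mem_cons, List.not_mem_nil, or_false, decide_eq_true_eq] at hs ⊢
  rcases hv with h | h | h <;> subst h <;>
    rcases hs with h | h | h | h | h | h | h | h | h | h | h | h | h | h | h | h <;>
    subst h <;> decide

theorem pvGood_foldB (l : List String) (s : PySem.Set String) (hs : pvGood s = true) :
    pvGood (l.foldl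
      (fun acc name =>
        match pvRetrievalMap.get? name with
        | some route => PySem.Set.add acc route
        | none => acc) s) = true := by
  induction l generalizing s with
  | nil => exact hs
  | cons t l ih =>
    simp only [List.foldl_cons]
    apply ih
    rcases pvMap_get_cases t with h | h | h | h <;> simp [h]
    · exact hs
    · exact pvGood_add s hs _ (Or.inl rfl)
    · exact pvGood_add s hs _ (Or.inr (Or.inl rfl))
    · exact pvGood_add s hs _ (Or.inr (Or.inr rfl))

-- on every reachable present-set, A's sort-with-key equals B's selection over the canonical order
theorem pvSort_eq_filter (s : List String) (hs : pvGood s = true) :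
    sort_routes s = pvRouteOrder.filter (fun r => PySem.Set.contains s r) := by
  simp only [pvGood, List.mem_cons, List.not_mem_nil, or_false, decide_eq_true_eq] at hs
  rcases hs with h | h | h | h | h | h | h | h | h | h | h | h | h | h | h | h <;>
    subst h <;> decide

-- ===== VERDICT (by name: the statement is the Claim_ definition above) =====
theorem tool_names_to_routes_py_spec : Claim_equal_tool_names_to_routes_py := by
  intro tool_names _
  unfold Spec_tool_names_to_routes_py tool_names_to_routes_py tool_names_to_routes_py_alt
  have hfold :
      tool_names.foldl
        (fun acc t =>
          if pvRetrievalMap.contains t then PySem.Set.add acc ((pvRetrievalMap.get? t).getD "") else acc)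
        PySem.Set.empty =
      tool_names.foldl
        (fun acc name =>
          match pvRetrievalMap.get? name with
          | some route => PySem.Set.add acc route
          | none => acc)
        PySem.Set.empty := by
    congr 1
    funext acc t
    exact pvStep_eq acc t
  rw [hfold]
  exact pvSort_eq_filter _ (pvGood_foldB tool_names PySem.Set.empty rfl)
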